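-- pv_equiv track=rewrite | github.com/ndlrf-rnd/book_of_pure_evil | split_utils.py | accum_txt_sentences
-- ===== SOURCE A (Python) =====
-- def accum_txt_sentences(chunk_len, txt):
--     representation_way = []
--     accum_sentence = []
--
--     count = chunk_len
--     for sentence in txt:
--         accum_sentence.extend(sentence)
--         if not count:
--             representation_way.append(accum_sentence)
--             accum_sentence = []
--             count = 3
--         count -= 1
--     representation_way.append(accum_sentence)
--     return representation_way
-- ===== SOURCE B (Python) =====
-- def accum_txt_sentences(chunk_len, txt):
--     def flat(sents):
--         return [tok for sent in sents for tok in sent]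
--     if chunk_len < 0 or chunk_len >= len(txt):
--         return [flat(txt)]
--     out = [flat(txt[:chunk_len + 1])]
--     rest = txt[chunk_len + 1:]
--     while len(rest) >= 3:
--         out.append(rest[0] + rest[1] + rest[2])
--         rest = rest[3:]
--     out.append(flat(rest))
--     return out
-- ===== Notes on version B (the rewrite author's own statement) =====
-- stated objective: alternative
-- what changed: Replaces A's flat pass with a per-sentence countdown counter by direct slicing: one flattened head chunk of chunk_len+1 sentences, then a loop peeling groups of three, then the leftover (possibly empty) chunk.
import Mathlib
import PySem

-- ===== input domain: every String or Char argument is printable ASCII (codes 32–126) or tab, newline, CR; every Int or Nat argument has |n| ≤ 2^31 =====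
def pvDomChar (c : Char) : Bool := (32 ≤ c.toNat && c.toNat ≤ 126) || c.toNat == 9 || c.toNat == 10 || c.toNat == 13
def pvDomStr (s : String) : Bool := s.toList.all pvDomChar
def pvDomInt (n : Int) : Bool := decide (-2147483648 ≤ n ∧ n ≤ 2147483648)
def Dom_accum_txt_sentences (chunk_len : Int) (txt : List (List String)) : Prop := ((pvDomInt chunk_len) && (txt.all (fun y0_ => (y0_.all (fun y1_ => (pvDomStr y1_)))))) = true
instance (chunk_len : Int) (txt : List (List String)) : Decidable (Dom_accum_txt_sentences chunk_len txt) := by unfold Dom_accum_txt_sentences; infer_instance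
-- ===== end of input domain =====

-- B replaces A's per-sentence countdown counter with direct slicing (head chunk, then groups of 3); alternative decomposition, same cost; equivalence of return values is proved below.

-- ===== PORT A =====
-- the for-loop of A, carrying its mutable state (representation_way, accum_sentence, count)
def pvAccumAux : List (List String) → List (List String) → List String → Int → List (List String)
  | [], rep, acc, _ => rep ++ [acc]
  | s :: rest, rep, acc, count =>
    let acc' := acc ++ s
    if count = 0 then pvAccumAux rest (rep ++ [acc']) [] (3 - 1)
    else pvAccumAux rest rep acc' (count - 1)

def accum_txt_sentences (chunk_len : Int) (txt : List (List String)) : List (List String) :=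
  pvAccumAux txt [] [] chunk_len

-- ===== PORT B =====
-- flat(sents) = [tok for sent in sents for tok in sent]
def pvFlat (sents : List (List String)) : List String := sents.flatMap id

-- the while-loop of B: peel groups of three sentences, then always append the leftover
def pvGroupRest : List (List String) → List (List String) → List (List String)
  | s :: t :: u :: rest, out => pvGroupRest rest (out ++ [s ++ t ++ u])
  | rest, out => out ++ [pvFlat rest]

def accum_txt_sentences_alt (chunk_len : Int) (txt : List (List String)) : List (List String) :=
  if chunk_len < 0 ∨ (txt.length : Int) ≤ chunk_len then [pvFlat txt]
  else pvGroupRest (txt.drop (chunk_len + 1).toNat) [pvFlat (txt.take (chunk_len + 1).toNat)]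

-- ===== PRECONDITION & SPEC =====
def Spec_accum_txt_sentences (chunk_len : Int) (txt : List (List String)) (out : List (List String)) : Prop := out = accum_txt_sentences_alt chunk_len txt
instance (chunk_len : Int) (txt : List (List String)) (out : List (List String)) : Decidable (Spec_accum_txt_sentences chunk_len txt out) := by unfold Spec_accum_txt_sentences; infer_instance

-- ===== CLAIM (what is proved, stated in full; the proofs are below) =====
def Claim_equal_accum_txt_sentences : Prop := ∀ (chunk_len : Int) (txt : List (List String)), Dom_accum_txt_sentences chunk_len txt → Spec_accum_txt_sentences chunk_len txt (accum_txt_sentences chunk_len txt)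

-- ===== LEMMAS AND PROOFS =====

-- with a negative counter, A never flushes: one chunk holding everything
theorem pvAccumAux_neg : ∀ (txt rep : List (List String)) (acc : List String) (count : Int),
    count < 0 → pvAccumAux txt rep acc count = rep ++ [acc ++ pvFlat txt]
  | [], rep, acc, count, _ => by simp [pvAccumAux, pvFlat]
  | s :: rest, rep, acc, count, h => by
    have hne : ¬ count = 0 := by omega
    rw [pvAccumAux]
    simp only [hne, if_false]
    rw [pvAccumAux_neg rest rep (acc ++ s) (count - 1) (by omega)]
    simp [pvFlat]

-- with a counter at least the list length, A never flushes either
theorem pvAccumAux_big : ∀ (txt rep : List (List String)) (acc : List String) (count : Int),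
    (txt.length : Int) ≤ count → pvAccumAux txt rep acc count = rep ++ [acc ++ pvFlat txt]
  | [], rep, acc, count, _ => by simp [pvAccumAux, pvFlat]
  | s :: rest, rep, acc, count, h => by
    have hne : ¬ count = 0 := by simp at h; omega
    rw [pvAccumAux]
    simp only [hne, if_false]
    rw [pvAccumAux_big rest rep (acc ++ s) (count - 1) (by simp at h ⊢; omega)]
    simp [pvFlat]

-- after a flush, A's counter cycles 2,1,0: exactly B's groups of three
theorem pvAccumAux_cycle : ∀ (rest out : List (List String)),
    pvAccumAux rest out [] 2 = pvGroupRest rest out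
  | [], out => by simp [pvAccumAux, pvGroupRest, pvFlat]
  | [s], out => by norm_num [pvAccumAux, pvGroupRest, pvFlat]
  | [s, t], out => by norm_num [pvAccumAux, pvGroupRest, pvFlat]
  | s :: t :: u :: rest, out => by
    rw [pvGroupRest]
    rw [← pvAccumAux_cycle rest (out ++ [s ++ t ++ u])]
    norm_num [pvAccumAux]

-- the countdown phase: counter 0 ≤ count < len, first flush after count+1 sentences
theorem pvAccumAux_main : ∀ (txt rep : List (List String)) (acc : List String) (count : Int),
    0 ≤ count → count < (txt.length : Int) →
    pvAccumAux txt rep acc count =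
      pvGroupRest (txt.drop (count + 1).toNat) (rep ++ [acc ++ pvFlat (txt.take (count + 1).toNat)])
  | [], rep, acc, count, h0, hlt => by simp at hlt; omega
  | s :: rest, rep, acc, count, h0, hlt => by
    rw [pvAccumAux]
    by_cases hc : count = 0
    · subst hc
      simp only [if_true]
      norm_num
      rw [pvAccumAux_cycle]
      norm_num [pvFlat]
    · simp only [hc, if_false]
      rw [pvAccumAux_main rest rep (acc ++ s) (count - 1) (by omega) (by simp at hlt; omega)]
      have h1 : (count + 1).toNat = (count - 1 + 1).toNat + 1 := by omega
      rw [h1]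
      simp [pvFlat]

-- ===== VERDICT (by name: the statement is the Claim_ definition above) =====
theorem accum_txt_sentences_spec : Claim_equal_accum_txt_sentences := by
  intro chunk_len txt _
  unfold Spec_accum_txt_sentences accum_txt_sentences accum_txt_sentences_alt
  by_cases hneg : chunk_len < 0
  · rw [pvAccumAux_neg txt [] [] chunk_len hneg]
    simp [hneg]
  · by_cases hbig : (txt.length : Int) ≤ chunk_len
    · rw [pvAccumAux_big txt [] [] chunk_len hbig]
      simp [hbig]
    · rw [pvAccumAux_main txt [] [] chunk_len (by omega) (by omega)]
      simp [hneg, hbig]
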